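-- pv_equiv track=rewrite | github.com/Finkch/Auto-Pixelart | auto.py | read_arguments
-- ===== SOURCE A (Python) =====
-- def read_arguments(args: list) -> tuple[list, dict]:
--
--     largs = []
--     kwargs = {}
--
--     # Read every item
--     while len(args) > 0:
--
--         # Looks for key-word
--         if '--' in args[0]:
--             kwargs[args[0][2:]] = args[ 1]
--             args = args[2:]
--
--         # Regular argument
--         else:
--             largs.append(args[0])
--             args = args[1:]
--
--     return largs, kwargs
-- ===== SOURCE B (Python) =====
-- def read_arguments(args: list) -> tuple[list, dict]:
--     # Single pass with an index pointer: no repeated list slicing (O(n) vs A's O(n^2)).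
--     largs = []
--     kwargs = {}
--     i = 0
--     n = len(args)
--     while i < n:
--         a = args[i]
--         if '--' in a:
--             kwargs[a[2:]] = args[i + 1]
--             i += 2
--         else:
--             largs.append(a)
--             i += 1
--     return largs, kwargs
-- ===== Notes on version B (the rewrite author's own statement) =====
-- stated objective: faster
-- what changed: Replaced A's repeated list re-slicing (args = args[1:]/args[2:] each iteration) by a single pass over the original list with an index pointer.
import Mathlib
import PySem

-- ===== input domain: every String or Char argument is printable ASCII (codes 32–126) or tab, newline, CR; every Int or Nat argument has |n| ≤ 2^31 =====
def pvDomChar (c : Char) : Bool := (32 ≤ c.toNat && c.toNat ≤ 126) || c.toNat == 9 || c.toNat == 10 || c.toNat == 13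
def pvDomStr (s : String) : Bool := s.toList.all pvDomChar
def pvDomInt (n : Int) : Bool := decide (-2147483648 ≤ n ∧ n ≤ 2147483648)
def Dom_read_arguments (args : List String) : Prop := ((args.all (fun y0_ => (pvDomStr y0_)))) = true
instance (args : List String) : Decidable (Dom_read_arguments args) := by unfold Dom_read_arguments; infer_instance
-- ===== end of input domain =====

-- B replaces A's repeated list re-slicing by a single pass with an index pointer (O(n) vs O(n^2)).

-- ===== PORT A =====
-- A's while-loop: consumes the list itself via slices args[1:] / args[2:].
def read_arguments_go (args largs : List String) (kwargs : PySem.Dict String String) :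
    List String × (List (String × String)) :=
  if 0 < args.length then
    let a0 := (PySem.List.pyGet? args 0).getD ""
    if PySem.Str.isIn "--" a0 then
      -- args[1] raises IndexError when absent (excluded by Pre_); total form via getD
      let v := (PySem.List.pyGet? args 1).getD ""
      read_arguments_go (PySem.List.slice args (some 2) none) largs
        (kwargs.insert (PySem.Str.slice a0 (some 2) none) v)
    else
      read_arguments_go (PySem.List.slice args (some 1) none) (largs ++ [a0]) kwargs
  else (largs, kwargs.items)
termination_by args.length
decreasing_by
  · rw [PySem.List.slice_from args (by omega : (0:Int) ≤ 2)]; simp; omega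
  · rw [PySem.List.slice_from args (by omega : (0:Int) ≤ 1)]; simp; omega

def read_arguments (args : List String) : List String × (List (String × String)) :=
  read_arguments_go args [] PySem.Dict.empty

-- ===== PORT B =====
-- B's while-loop: index pointer i over the unchanged list.
def read_arguments_alt_go (args : List String) (n : Nat) (i : Nat) (largs : List String)
    (kwargs : PySem.Dict String String) : List String × (List (String × String)) :=
  if i < n then
    let a := (PySem.List.pyGet? args (i : Int)).getD ""
    if PySem.Str.isIn "--" a then
      read_arguments_alt_go args n (i + 2) largs
        (kwargs.insert (PySem.Str.slice a (some 2) none)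
          ((PySem.List.pyGet? args ((i : Int) + 1)).getD ""))
    else
      read_arguments_alt_go args n (i + 1) (largs ++ [a]) kwargs
  else (largs, kwargs.items)
termination_by n - i

def read_arguments_alt (args : List String) : List String × (List (String × String)) :=
  read_arguments_alt_go args args.length 0 [] PySem.Dict.empty

-- ===== PRECONDITION & SPEC =====
-- Pre_ excludes exactly the inputs on which A raises IndexError (args[1] with a lone trailing
-- keyword token): the loop enters the maximal trailing block of '--'-containing tokens at its first
-- element and consumes it in pairs, so A raises iff that trailing block has odd length.
def Pre_read_arguments (args : List String) : Prop :=
  (args.reverse.takeWhile (fun s => PySem.Str.isIn "--" s)).length % 2 = 0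
instance (args : List String) : Decidable (Pre_read_arguments args) := by
  unfold Pre_read_arguments; infer_instance

def pvWitness_read_arguments : List String := ["img.png", "--scale", "4", "extra"]

def Spec_read_arguments (args : List String) (out : List String × (List (String × String))) : Prop := out = read_arguments_alt args
instance (args : List String) (out : List String × (List (String × String))) : Decidable (Spec_read_arguments args out) := by unfold Spec_read_arguments; infer_instance

-- ===== CLAIM (what is proved, stated in full; the proofs are below) =====
def Claim_equal_read_arguments : Prop := ∀ (args : List String), Dom_read_arguments args → Pre_read_arguments args → Spec_read_arguments args (read_arguments args)

-- ===== LEMMAS AND PROOFS =====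

theorem read_arguments_go_eq_fuel (args : List String) :
    ∀ (k i : Nat) (largs : List String) (kwargs : PySem.Dict String String),
    args.length ≤ i + k →
    read_arguments_go (args.drop i) largs kwargs =
      read_arguments_alt_go args args.length i largs kwargs := by
  intro k
  induction k with
  | zero =>
    intro i largs kwargs hk
    rw [read_arguments_go, read_arguments_alt_go]
    simp only [List.drop_eq_nil_of_le (show args.length ≤ i by omega)]
    rw [read_arguments_alt_go]
    simp [show ¬ i < args.length by omega]
  | succ k ih =>
    intro i largs kwargs hk
    by_cases h : i < args.length
    · rw [read_arguments_go, read_arguments_alt_go]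
      have hlen : 0 < (args.drop i).length := by simp; omega
      have hg0 : PySem.List.pyGet? (args.drop i) 0 = PySem.List.pyGet? args (i : Int) := by
        rw [PySem.List.pyGet?_natCast args i]
        simpa [List.getElem?_drop] using PySem.List.pyGet?_natCast (args.drop i) 0
      have hg1 : PySem.List.pyGet? (args.drop i) 1 = PySem.List.pyGet? args ((i : Int) + 1) := by
        have h1 := PySem.List.pyGet?_natCast args (i + 1)
        push_cast at h1
        rw [h1]
        simpa [List.getElem?_drop] using PySem.List.pyGet?_natCast (args.drop i) 1
      have hd2 : PySem.List.slice (args.drop i) (some 2) = args.drop (i + 2) := by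
        rw [PySem.List.slice_from (args.drop i) (by omega : (0:Int) ≤ 2), List.drop_drop]
        norm_num
        omega
      have hd1 : PySem.List.slice (args.drop i) (some 1) = args.drop (i + 1) := by
        rw [PySem.List.slice_from (args.drop i) (by omega : (0:Int) ≤ 1), List.drop_drop]
        norm_num
      simp only [hlen, if_pos, hg0, hg1, hd2, hd1, if_pos h]
      by_cases hkw : PySem.Str.isIn "--" ((PySem.List.pyGet? args (i : Int)).getD "") = true
      · simp only [hkw, if_pos]
        exact ih (i + 2) largs _ (by omega)
      · simp only [hkw, if_neg, Bool.not_eq_true]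
        exact ih (i + 1) (largs ++ [(PySem.List.pyGet? args (i : Int)).getD ""]) kwargs (by omega)
    · rw [read_arguments_go, read_arguments_alt_go]
      simp [List.drop_eq_nil_of_le (show args.length ≤ i by omega), h]

theorem read_arguments_go_eq (args : List String) (i : Nat) (largs : List String)
    (kwargs : PySem.Dict String String) :
    read_arguments_go (args.drop i) largs kwargs =
      read_arguments_alt_go args args.length i largs kwargs :=
  read_arguments_go_eq_fuel args args.length i largs kwargs (by omega)

-- ===== VERDICT (by name: the statement is the Claim_ definition above) =====
theorem read_arguments_spec : Claim_equal_read_arguments := by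
  intro args _ _
  unfold Spec_read_arguments read_arguments read_arguments_alt
  simpa using read_arguments_go_eq args 0 [] PySem.Dict.empty
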